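-- pv_equiv track=rewrite | github.com/ASSERT-KTH/Mokav | experiments/pynguin/c4b/single-return/generated_tests/src_267/4/src_267.py | func
-- ===== SOURCE A (Python) =====
-- def func(*args):
--
-- 	n = int(args[0])
-- 	names = ['Sheldon', 'Leonard', 'Penny', 'Rajesh', 'Howard']
-- 	cnt = 1
-- 	while (n > (cnt * 5)):
-- 	    n -= (cnt * 5)
-- 	    cnt *= 2
-- 	return(names[((n - 1) // cnt)])
-- ===== SOURCE B (Python) =====
-- def func(*args):
--     n = int(args[0])
--     names = ['Sheldon', 'Leonard', 'Penny', 'Rajesh', 'Howard']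
--     x = (n + 9) // 5                       # = ceil((n + 5) / 5)
--     k = max((x - 1).bit_length() - 1, 0)   # block exponent: smallest k with n <= 5*(2**(k+1) - 1)
--     cnt = 1 << k
--     return names[(n - 5 * (cnt - 1) - 1) // cnt]
-- ===== Notes on version B (the rewrite author's own statement) =====
-- stated objective: simpler
-- what changed: Replaced the doubling while-loop by a closed form: the block exponent k is computed directly via bit_length of ceil((n+5)/5)-1, then one floor division indexes the names list.
-- outside the precondition, e.g. on func(-5): A raises IndexError, B raises IndexError
import Mathlib
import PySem

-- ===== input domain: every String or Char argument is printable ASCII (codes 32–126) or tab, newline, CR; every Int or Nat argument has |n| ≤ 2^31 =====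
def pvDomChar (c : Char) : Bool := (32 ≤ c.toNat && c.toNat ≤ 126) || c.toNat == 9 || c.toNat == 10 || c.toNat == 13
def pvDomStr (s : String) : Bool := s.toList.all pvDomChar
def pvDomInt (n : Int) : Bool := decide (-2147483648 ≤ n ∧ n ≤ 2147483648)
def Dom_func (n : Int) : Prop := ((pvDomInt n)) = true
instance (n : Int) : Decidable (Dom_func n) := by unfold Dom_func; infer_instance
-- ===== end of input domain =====

-- B replaces A's doubling while-loop by a closed form via bit_length (objective: simpler).

-- ===== PORT A =====
-- the while-loop of A; the '0 < cnt' conjunct is a totality guard only (cnt starts at 1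
-- and only doubles, so it is always true on the executions A performs)
def funcLoop (n cnt : Int) : Int × Int :=
  if 0 < cnt ∧ cnt * 5 < n then funcLoop (n - cnt * 5) (cnt * 2) else (n, cnt)
termination_by n.toNat
decreasing_by omega

def func (n : Int) : String :=
  let names := ["Sheldon", "Leonard", "Penny", "Rajesh", "Howard"]
  let p := funcLoop n 1
  ((PySem.List.pyGet? names (PySem.Int.floordiv (p.1 - 1) p.2)).getD "")

-- ===== PORT B =====
def func_alt (n : Int) : String :=
  let names := ["Sheldon", "Leonard", "Penny", "Rajesh", "Howard"]
  let x := PySem.Int.floordiv (n + 9) 5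
  let k : Int := max ((PySem.Int.bitLength (x - 1) : Int) - 1) 0
  let cnt : Int := 2 ^ k.toNat
  ((PySem.List.pyGet? names (PySem.Int.floordiv (n - 5 * (cnt - 1) - 1) cnt)).getD "")

-- ===== PRECONDITION & SPEC =====
-- Pre_ excludes exactly n ≤ -5, where A's final list indexing raises IndexError (B raises there too).
def Pre_func (n : Int) : Prop := -4 ≤ n
instance (n : Int) : Decidable (Pre_func n) := by unfold Pre_func; infer_instance
def pvWitness_func : Int := (7)

def Spec_func (n : Int) (out : String) : Prop := out = func_alt n
instance (n : Int) (out : String) : Decidable (Spec_func n out) := by unfold Spec_func; infer_instance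

-- ===== CLAIM (what is proved, stated in full; the proofs are below) =====
def Claim_equal_func : Prop := ∀ (n : Int), Dom_func n → Pre_func n → Spec_func n (func n)

-- ===== LEMMAS AND PROOFS =====

-- the loop runs exactly K iterations when n lies in the K-th doubling block (relative to cnt)
theorem funcLoop_run (K : Nat) : ∀ (n cnt : Int), 0 < cnt →
    n ≤ 5 * cnt * (2 ^ (K + 1) - 1) →
    (∀ j : Nat, j < K → 5 * cnt * (2 ^ (j + 1) - 1) < n) →
    funcLoop n cnt = (n - 5 * cnt * (2 ^ K - 1), cnt * 2 ^ K) := by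
  induction K with
  | zero =>
    intro n cnt hc hstop _
    rw [funcLoop, if_neg]
    · norm_num
    · rintro ⟨_, h5⟩
      norm_num at hstop
      linarith
  | succ K ih =>
    intro n cnt hc hstop hgo
    have h0 := hgo 0 (Nat.succ_pos K)
    norm_num at h0
    rw [funcLoop, if_pos ⟨hc, by linarith⟩]
    have := ih (n - cnt * 5) (cnt * 2) (by linarith)
      (by have : (2:Int) ^ (K + 1 + 1) = 2 * 2 ^ (K + 1) := by ring
          rw [this] at hstop; ring_nf; ring_nf at hstop; linarith)
      (by intro j hj
          have := hgo (j + 1) (by omega)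
          have h2 : (2:Int) ^ (j + 1 + 1) = 2 * 2 ^ (j + 1) := by ring
          rw [h2] at this; ring_nf; ring_nf at this; linarith)
    rw [this]
    have h2 : (2:Int) ^ (K + 1) = 2 * 2 ^ K := by ring
    rw [h2]
    simp only [Prod.mk.injEq]
    constructor <;> ring

theorem func_spec : Claim_equal_func := by
  unfold Claim_equal_func Spec_func Pre_func
  intro n _ hp
  -- notation
  set x := PySem.Int.floordiv (n + 9) 5 with hxdef
  have hx : 5 * (x - 1) < n + 5 ∧ n + 5 ≤ 5 * x := by
    rw [hxdef, PySem.Int.floordiv_eq_ediv_of_pos (by norm_num)]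
    omega
  have hx1 : 1 ≤ x := by omega
  set bl := PySem.Int.bitLength (x - 1) with hbldef
  set K : Nat := bl - 1 with hKdef
  -- the two block inequalities
  have hK1 : n ≤ 5 * ((2:Int) ^ (K + 1) - 1) := by
    rcases eq_or_lt_of_le hx1 with h1 | h1
    · have hbl0 : bl = 0 := by rw [hbldef, ← h1]; simp
      have : K = 0 := by omega
      rw [this]
      norm_num
      omega
    · -- x - 1 > 0
      have hpos : (0:Int) < x - 1 := by omega
      have habs := PySem.Int.lt_two_pow_bitLength (x - 1)
      rw [← hbldef] at habs
      have hcast : ((x - 1).natAbs : Int) = x - 1 := Int.natAbs_of_nonneg (by omega)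
      have hlt : x - 1 < (2:Int) ^ bl := by
        rw [← hcast]
        exact_mod_cast habs
      have hbl1 : 1 ≤ bl := by
        by_contra h
        have : bl = 0 := by omega
        rw [this] at hlt
        norm_num at hlt
        omega
      have hKbl : K + 1 = bl := by omega
      rw [hKbl]
      linarith
  have hK2 : ∀ j : Nat, j < K → 5 * ((2:Int) ^ (j + 1) - 1) < n := by
    intro j hj
    have hbl1 : 1 ≤ bl := by omega
    have hne : x - 1 ≠ 0 := by
      intro h
      have : bl = 0 := by rw [hbldef, h]; simp
      omega
    have habs := PySem.Int.two_pow_bitLength_le (x - 1) hne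
    rw [← hbldef] at habs
    have hcast : ((x - 1).natAbs : Int) = x - 1 :=
      Int.natAbs_of_nonneg (by omega)
    have hle : (2:Int) ^ (bl - 1) ≤ x - 1 := by
      rw [← hcast]
      exact_mod_cast habs
    have hKe : (2:Int) ^ K ≤ x - 1 := by rw [hKdef]; exact hle
    have hmono : (2:Int) ^ (j + 1) ≤ 2 ^ K :=
      pow_le_pow_right₀ (by norm_num) (by omega)
    linarith
  -- run the loop
  have hloop := funcLoop_run K n 1 (by norm_num)
    (by linarith [hK1]) (by intro j hj; have := hK2 j hj; linarith)
  -- B's exponent equals K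
  have hk : (max ((bl : Int) - 1) 0).toNat = K := by omega
  show func n = func_alt n
  unfold func func_alt
  dsimp only
  rw [← hxdef, ← hbldef, hk, hloop]
  have e : n - 5 * 1 * ((2:Int) ^ K - 1) - 1 = n - 5 * ((2:Int) ^ K - 1) - 1 := by ring
  simp only [one_mul, e]
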